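-- pv_equiv track=rewrite | github.com/anafro/leetcode | 3. Longest Substring Without Repeating Characters.py | has_unique_of_length
-- ===== SOURCE A (Python) =====
-- def are_all_chars_unique(string: str) -> bool:
--     chars = set(string)
--     return all(string.count(char) == 1 for char in chars)
--
-- def has_unique_of_length(string: str, length: int) -> bool:
--     if len(string) < length:
--         return False
--
--     begin = 0
--     end = length
--
--     while end <= len(string):
--         substring = string[begin:end]
--
--         if are_all_chars_unique(substring):
--             return True
--         else:
--             begin += 1
--             end += 1
--
--     return False
-- ===== SOURCE B (Python) =====
-- def has_unique_of_length(string: str, length: int) -> bool: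
--     # Single pass: `cur` = length of the longest duplicate-free substring
--     # ending at the current position, maintained from each char's last index.
--     if length <= 0:
--         return True
--     last = {}
--     cur = 0
--     for i, c in enumerate(string):
--         prev = last.get(c, -1)
--         cur = min(cur + 1, i - prev)
--         last[c] = i
--         if cur >= length:
--             return True
--     return False
-- ===== Notes on version B (the rewrite author's own statement) =====
-- stated objective: faster
-- what changed: Replaces the slide-every-window-and-count-each-char scan with a single last-occurrence sliding-window pass that tracks the longest duplicate-free substring ending at each index.
import Mathlib
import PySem

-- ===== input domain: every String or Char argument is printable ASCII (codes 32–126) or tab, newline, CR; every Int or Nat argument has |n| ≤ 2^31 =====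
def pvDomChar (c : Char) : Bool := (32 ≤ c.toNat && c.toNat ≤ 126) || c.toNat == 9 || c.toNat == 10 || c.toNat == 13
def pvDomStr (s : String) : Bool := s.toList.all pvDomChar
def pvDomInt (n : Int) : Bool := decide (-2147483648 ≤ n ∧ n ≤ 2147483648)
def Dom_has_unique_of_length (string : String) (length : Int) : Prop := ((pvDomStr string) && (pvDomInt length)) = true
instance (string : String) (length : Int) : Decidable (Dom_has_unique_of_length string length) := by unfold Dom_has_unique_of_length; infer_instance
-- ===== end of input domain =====

-- B replaces A's slide-every-window-and-count-each-char check with a single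
-- last-occurrence pass tracking the longest duplicate-free substring ending at each index.

-- ===== PORT A =====
-- helper: are_all_chars_unique, ported on List Char (Python iterates/counts the str charwise)
def are_all_chars_unique (string : List Char) : Bool :=
  let chars := PySem.Set.ofList string
  chars.all (fun c => PySem.List.count string c == 1)

-- the while loop of A; fuel = exact bound on the remaining iterations (end goes up by 1
-- each round and the loop body runs only while end ≤ n, so fuel 0 ⟺ the loop has exited)
def loopA (l : List Char) (k : Int) : Nat → Int → Bool
  | 0, _ => false
  | fuel+1, begin_ =>
    if begin_ + k ≤ (l.length : Int) then
      if are_all_chars_unique (PySem.List.slice l (some begin_) (some (begin_ + k))) then true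
      else loopA l k fuel (begin_ + 1)
    else false

def has_unique_of_length (string : String) (length : Int) : Bool :=
  let l := string.toList
  if (l.length : Int) < length then false
  else loopA l length ((l.length : Int) - length + 1).toNat 0

-- ===== PORT B =====
-- the for loop of B over enumerate(string), carrying the dict `last` and `cur`
def loopB (k : Int) : List (Int × Char) → PySem.Dict Char Int → Int → Bool
  | [], _, _ => false
  | (i, c) :: rest, last, cur =>
    let prev := last.getD c (-1)
    let cur' := min (cur + 1) (i - prev)
    let last' := last.insert c i
    if k ≤ cur' then true else loopB k rest last' cur'

def has_unique_of_length_alt (string : String) (length : Int) : Bool :=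
  if length ≤ 0 then true
  else loopB length (PySem.List.enumerate string.toList 0) PySem.Dict.empty 0

-- ===== PRECONDITION & SPEC =====
def Spec_has_unique_of_length (string : String) (length : Int) (out : Bool) : Prop := out = has_unique_of_length_alt string length
instance (string : String) (length : Int) (out : Bool) : Decidable (Spec_has_unique_of_length string length out) := by unfold Spec_has_unique_of_length; infer_instance

-- ===== CLAIM (what is proved, stated in full; the proofs are below) =====
def Claim_equal_has_unique_of_length : Prop := ∀ (string : String) (length : Int), Dom_has_unique_of_length string length → Spec_has_unique_of_length string length (has_unique_of_length string length)

-- ===== LEMMAS AND PROOFS =====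

-- the window of length m starting at s
def win (l : List Char) (s m : Nat) : List Char := (l.drop s).take m

-- index of the last occurrence of c among l[0..i), -1 if none (Python's last.get(c, -1))
def lastOcc (l : List Char) : Nat → Char → Int
  | 0, _ => -1
  | i+1, c => if l[i]? = some c then (i : Int) else lastOcc l i c

-- length of the longest duplicate-free window of l ending at position i (exclusive)
def gZ (l : List Char) : Nat → Int
  | 0 => 0
  | i+1 => min (gZ l i + 1) ((i : Int) - lastOcc l i (l[i]?.getD ' '))

lemma unique_iff_nodup (s : List Char) : are_all_chars_unique s = true ↔ s.Nodup := by
  simp only [are_all_chars_unique, List.all_eq_true, beq_iff_eq, PySem.List.count]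
  rw [List.nodup_iff_count_eq_one]
  constructor
  · intro h a ha; exact h a ((PySem.Set.mem_ofList s a).mpr ha)
  · intro h a ha; exact h a ((PySem.Set.mem_ofList s a).mp ha)

lemma lastOcc_lt (l : List Char) (i : Nat) (c : Char) :
    -1 ≤ lastOcc l i c ∧ lastOcc l i c < (i : Int) := by
  induction i with
  | zero => simp [lastOcc]
  | succ i ih =>
    simp only [lastOcc]
    split_ifs with h
    · omega
    · omega

lemma lastOcc_ge (l : List Char) {i j : Nat} {c : Char} (hj : j < i) (h : l[j]? = some c) :
    (j : Int) ≤ lastOcc l i c := by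
  induction i with
  | zero => omega
  | succ i ih =>
    simp only [lastOcc]
    split_ifs with h'
    · omega
    · rcases Nat.lt_succ_iff_lt_or_eq.mp hj with hj' | rfl
      · exact ih hj'
      · exact absurd h h'

lemma lastOcc_mem (l : List Char) {i : Nat} {c : Char} (h : 0 ≤ lastOcc l i c) :
    ∃ j : Nat, (j : Int) = lastOcc l i c ∧ j < i ∧ l[j]? = some c := by
  induction i with
  | zero => simp [lastOcc] at h
  | succ i ih =>
    by_cases h' : l[i]? = some c
    · exact ⟨i, by simp [lastOcc, h'], by omega, h'⟩
    · simp only [lastOcc, h', if_false] at h ⊢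
      obtain ⟨j, hj1, hj2, hj3⟩ := ih h
      exact ⟨j, hj1, by omega, hj3⟩

lemma mem_win (l : List Char) (s m : Nat) (c : Char) :
    c ∈ win l s m ↔ ∃ j : Nat, s ≤ j ∧ j < s + m ∧ l[j]? = some c := by
  unfold win
  constructor
  · intro hc
    obtain ⟨t, ht, rfl⟩ := List.mem_take_iff_getElem.mp hc
    refine ⟨s + t, by omega, by omega, ?_⟩
    rw [List.getElem_drop]
    rw [List.getElem?_eq_getElem]
  · rintro ⟨j, hj1, hj2, hj3⟩
    have hjl : j < l.length := (List.getElem?_eq_some_iff.mp hj3).1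
    have : l[j] = c := by simpa [List.getElem?_eq_getElem hjl] using hj3
    apply List.mem_take_iff_getElem.mpr
    refine ⟨j - s, by simp; omega, ?_⟩
    rw [List.getElem_drop]
    simp only [← this]
    congr 1
    omega

lemma win_concat (l : List Char) (s m : Nat) (h : s + m < l.length) :
    win l s (m + 1) = win l s m ++ [l[s + m]] := by
  unfold win
  rw [List.take_add_one]
  congr 1
  rw [List.getElem?_drop, List.getElem?_eq_getElem h]
  simp

lemma gZ_bounds (l : List Char) (i : Nat) : 0 ≤ gZ l i ∧ gZ l i ≤ (i : Int) := by
  induction i with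
  | zero => simp [gZ]
  | succ i ih =>
    simp only [gZ]
    have := lastOcc_lt l i (l[i]?.getD ' ')
    omega

lemma gZ_char (l : List Char) : ∀ i : Nat, i ≤ l.length →
    ∀ m : Nat, m ≤ i → ((m : Int) ≤ gZ l i ↔ (win l (i - m) m).Nodup) := by
  intro i
  induction i with
  | zero =>
    intro _ m hm
    interval_cases m
    simp [gZ, win]
  | succ i ih =>
    intro hi1 m hm
    have hi : i < l.length := by omega
    have hget : l[i]? = some l[i] := List.getElem?_eq_getElem hi
    have hc : l[i]?.getD ' ' = l[i] := by simp [hget]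
    match m with
    | 0 =>
      have := gZ_bounds l (i + 1)
      simp only [Nat.cast_zero, win, List.take_zero]
      simp only [List.nodup_nil, iff_true]
      omega
    | m' + 1 =>
      have hm' : m' ≤ i := by omega
      have heq : i + 1 - (m' + 1) = i - m' := by omega
      have hidx : i - m' + m' = i := by omega
      have hwin : win l (i + 1 - (m' + 1)) (m' + 1) = win l (i - m') m' ++ [l[i]] := by
        rw [heq, win_concat l (i - m') m' (by omega)]
        simp only [hidx]
      rw [hwin]
      have hnodup : (win l (i - m') m' ++ [l[i]]).Nodup
          ↔ (win l (i - m') m').Nodup ∧ l[i] ∉ win l (i - m') m' := by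
        rw [← List.concat_eq_append, List.nodup_concat]
        tauto
      rw [hnodup]
      set p := lastOcc l i (l[i]) with hp
      have hgz : gZ l (i + 1) = min (gZ l i + 1) ((i : Int) - p) := by
        simp only [gZ, hc, hp]
      have hsplit : ((m' + 1 : Nat) : Int) ≤ gZ l (i + 1)
          ↔ ((m' : Nat) : Int) ≤ gZ l i ∧ ((m' : Nat) : Int) + 1 ≤ (i : Int) - p := by
        rw [hgz]
        push_cast
        omega
      rw [hsplit, ih (by omega) m' hm']
      have hA2 : ((m' : Nat) : Int) + 1 ≤ (i : Int) - p ↔ l[i] ∉ win l (i - m') m' := by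
        constructor
        · intro hle hmem
          obtain ⟨j, hj1, hj2, hj3⟩ := (mem_win l (i - m') m' (l[i])).mp hmem
          have hjp : (j : Int) ≤ p := lastOcc_ge l (by omega) hj3
          have : (i : Int) - (m' : Int) ≤ (j : Int) := by
            have : ((i - m' : Nat) : Int) = (i : Int) - (m' : Int) := by omega
            omega
          omega
        · intro hnm
          by_contra hle
          have hp0 : 0 ≤ p := by
            have := lastOcc_lt l i (l[i])
            omega
          obtain ⟨j, hj1, hj2, hj3⟩ := lastOcc_mem l (hp ▸ hp0)
          apply hnm
          apply (mem_win l (i - m') m' (l[i])).mpr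
          have hji : (j : Int) = p := hj1
          have h1 : i - m' ≤ j := by omega
          have h2 : j < i - m' + m' := by omega
          exact ⟨j, h1, h2, hj3⟩
      rw [hA2]

lemma loopB_spec_aux (l : List Char) (k : Int) :
    ∀ (d i : Nat), l.length - i = d →
    ∀ (last : PySem.Dict Char Int) (cur : Int),
    (∀ c, last.getD c (-1) = lastOcc l i c) → cur = gZ l i →
    loopB k (PySem.List.enumerate (l.drop i) (i : Int)) last cur
      = decide (∃ j < l.length, i ≤ j ∧ k ≤ gZ l (j + 1)) := by
  intro d
  induction d with
  | zero =>
    intro i hd last cur _ _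
    have hlen : l.length ≤ i := by omega
    rw [List.drop_of_length_le hlen]
    rw [PySem.List.enumerate_nil]
    simp only [loopB]
    symm
    simp only [decide_eq_false_iff_not]
    rintro ⟨j, hj, hij, _⟩
    omega
  | succ d ihd =>
    intro i hd last cur hinv hcur
    have hi : i < l.length := by omega
    have hget : l[i]? = some l[i] := List.getElem?_eq_getElem hi
    have hdrop : l.drop i = l[i] :: l.drop (i + 1) := List.drop_eq_getElem_cons hi
    rw [hdrop, PySem.List.enumerate_cons]
    simp only [loopB]
    have hprev : last.getD l[i] (-1) = lastOcc l i (l[i]) := hinv l[i]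
    have hcur' : min (cur + 1) ((i : Int) - last.getD l[i] (-1)) = gZ l (i + 1) := by
      rw [hprev, hcur]
      simp only [gZ, hget, Option.getD_some]
    rw [hcur']
    by_cases hk : k ≤ gZ l (i + 1)
    · rw [if_pos hk]
      symm
      rw [decide_eq_true_eq]
      exact ⟨i, hi, le_refl i, hk⟩
    · rw [if_neg hk]
      have hinv' : ∀ c, (last.insert l[i] (i : Int)).getD c (-1) = lastOcc l (i + 1) c := by
        intro c
        rw [PySem.Dict.getD_insert]
        simp only [lastOcc]
        by_cases hc : c = l[i]
        · rw [if_pos hc, if_pos (by rw [hget, hc])]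
        · rw [if_neg hc, if_neg (by rw [hget]; simp; exact fun h => hc h.symm), hinv c]
      have hcast : (i : Int) + 1 = ((i + 1 : Nat) : Int) := by omega
      rw [hcast, ihd (i + 1) (by omega) _ _ hinv' rfl]
      rw [decide_eq_decide]
      constructor
      · rintro ⟨j, hj, hij, hkj⟩
        exact ⟨j, hj, by omega, hkj⟩
      · rintro ⟨j, hj, hij, hkj⟩
        refine ⟨j, hj, ?_, hkj⟩
        by_cases hji : j = i
        · exact absurd (hji ▸ hkj) hk
        · omega

lemma loopA_spec (l : List Char) (k : Nat) :
    ∀ (fuel b : Nat), fuel = l.length + 1 - (b + k) →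
    loopA l (k : Int) fuel (b : Int)
      = decide (∃ s < l.length + 1, b ≤ s ∧ s + k ≤ l.length ∧ (win l s k).Nodup) := by
  intro fuel
  induction fuel with
  | zero =>
    intro b hf
    simp only [loopA]
    symm
    simp only [decide_eq_false_iff_not]
    rintro ⟨s, hs, hbs, hsk, _⟩
    omega
  | succ fuel ih =>
    intro b hf
    have hbk : b + k ≤ l.length := by omega
    simp only [loopA]
    rw [if_pos (by omega)]
    rw [PySem.List.slice_natCast_add]
    have hwin : (l.drop b).take k = win l b k := rfl
    rw [hwin]
    by_cases hu : are_all_chars_unique (win l b k) = true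
    · rw [if_pos hu]
      symm
      rw [decide_eq_true_eq]
      exact ⟨b, by omega, le_refl b, hbk, (unique_iff_nodup _).mp hu⟩
    · rw [if_neg hu]
      have hcast : (b : Int) + 1 = ((b + 1 : Nat) : Int) := by omega
      rw [hcast, ih (b + 1) (by omega)]
      rw [decide_eq_decide]
      have hnd : ¬ (win l b k).Nodup := fun h => hu ((unique_iff_nodup _).mpr h)
      constructor
      · rintro ⟨s, hs, hbs, hsk, hn⟩
        exact ⟨s, hs, by omega, hsk, hn⟩
      · rintro ⟨s, hs, hbs, hsk, hn⟩
        refine ⟨s, hs, ?_, hsk, hn⟩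
        by_cases hsb : s = b
        · exact absurd (hsb ▸ hn) hnd
        · omega

lemma loopA_nonpos (l : List Char) (k : Int) :
    ∀ (fuel : Nat) (b : Int), 0 ≤ b → b + k ≤ 0 → (-(b + k)).toNat < fuel →
    loopA l k fuel b = true := by
  intro fuel
  induction fuel with
  | zero => intro b _ _ h; omega
  | succ fuel ih =>
    intro b hb hbk hfuel
    simp only [loopA]
    rw [if_pos (by have : (0 : Int) ≤ (l.length : Int) := by positivity
                   omega)]
    by_cases hu : are_all_chars_unique (PySem.List.slice l (some b) (some (b + k))) = true
    · rw [if_pos hu]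
    · rw [if_neg hu]
      by_cases hz : b + k = 0
      · exfalso
        apply hu
        rw [PySem.List.slice_toNat l hb (by omega)]
        have : (b + k).toNat = 0 := by omega
        rw [this]
        simp [unique_iff_nodup]
      · exact ih (b + 1) (by omega) (by omega) (by omega)

-- ===== VERDICT (by name: the statement is the Claim_ definition above) =====
theorem has_unique_of_length_spec : Claim_equal_has_unique_of_length := by
  intro string length _
  unfold Spec_has_unique_of_length has_unique_of_length has_unique_of_length_alt
  set l := string.toList with hl
  by_cases hneg : length ≤ 0
  · rw [if_pos hneg]
    have hn0 : (0 : Int) ≤ (l.length : Int) := by positivity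
    rw [if_neg (by omega)]
    exact loopA_nonpos l length _ 0 le_rfl (by omega) (by omega)
  · rw [if_neg hneg]
    have hB : loopB length (PySem.List.enumerate l 0) PySem.Dict.empty 0
        = decide (∃ j < l.length, 0 ≤ j ∧ length ≤ gZ l (j + 1)) := by
      have h := loopB_spec_aux l length l.length 0 (by omega) PySem.Dict.empty 0
        (fun c => by rw [PySem.Dict.getD_empty]; rfl) rfl
      simpa using h
    rw [hB]
    by_cases hlt : (l.length : Int) < length
    · rw [if_pos hlt]
      symm
      simp only [decide_eq_false_iff_not]
      rintro ⟨j, hj, -, hkj⟩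
      have h2 := (gZ_bounds l (j + 1)).2
      omega
    · rw [if_neg hlt]
      have hcast : ((length.toNat : Nat) : Int) = length := by omega
      have hfuel : ((l.length : Int) - length + 1).toNat
          = l.length + 1 - length.toNat := by omega
      have hA := loopA_spec l length.toNat (l.length + 1 - (0 + length.toNat)) 0 rfl
      rw [hcast] at hA
      norm_num at hA
      rw [hfuel, hA]
      rw [decide_eq_decide]
      constructor
      · rintro ⟨s, hs, hsk, hn⟩
        refine ⟨s + length.toNat - 1, by omega, by omega, ?_⟩
        have he : s + length.toNat - 1 + 1 = s + length.toNat := by omega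
        rw [he, ← hcast]
        apply (gZ_char l (s + length.toNat) (by omega) length.toNat (by omega)).mpr
        have hss : s + length.toNat - length.toNat = s := by omega
        rw [hss]
        exact hn
      · rintro ⟨j, hj, -, hkj⟩
        have hb2 := (gZ_bounds l (j + 1)).2
        have hkj1 : length.toNat ≤ j + 1 := by omega
        have hn := (gZ_char l (j + 1) (by omega) length.toNat hkj1).mp
          (by rw [hcast]; exact hkj)
        exact ⟨j + 1 - length.toNat, by omega, by omega, hn⟩
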